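-- pv_equiv track=rewrite | github.com/Morzh7771/anger_arena_new_rising | scripts/npc/print_herolist.py | to_name
-- ===== SOURCE A (Python) =====
-- def to_name(string):
--     string = string.replace('npc_dota_hero_', '')
--     while '\t' in string:
--         string = string.replace('\t', '')
--     while '\n' in string:
--         string = string.replace('\n', '')
--     while '\t1' in string:
--         string = string.replace('\t1', '')
--     while ' ' in string:
--         string = string.replace(' ', '')
--     while '"' in string:
--         string = string.replace('"', '')
--     string = string.replace('1', '')
--     string = string.replace('0', '')
--     return string
-- ===== SOURCE B (Python) =====
-- DROP = '\t\n "10'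
--
-- def to_name(string):
--     string = string.replace('npc_dota_hero_', '')
--     return ''.join(c for c in string if c not in DROP)
-- ===== Notes on version B (the rewrite author's own statement) =====
-- stated objective: simpler
-- what changed: A removes each unwanted substring with its own repeated full-string replace pass (five loops, one of them dead, plus two trailing replaces); B does the prefix replace and then a single character-filter pass with one drop-set.
import Mathlib
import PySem

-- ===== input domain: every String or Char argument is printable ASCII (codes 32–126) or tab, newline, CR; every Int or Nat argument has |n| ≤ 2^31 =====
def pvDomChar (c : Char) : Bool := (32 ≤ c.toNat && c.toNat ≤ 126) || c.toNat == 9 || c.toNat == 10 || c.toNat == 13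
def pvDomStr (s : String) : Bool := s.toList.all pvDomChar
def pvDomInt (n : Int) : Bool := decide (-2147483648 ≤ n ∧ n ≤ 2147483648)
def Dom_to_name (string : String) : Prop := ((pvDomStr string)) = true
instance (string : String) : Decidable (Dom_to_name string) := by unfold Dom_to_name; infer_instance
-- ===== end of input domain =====

-- B replaces A's five `while sub in s: s = s.replace(sub,'')` passes and two final replaces
-- by ONE character-filter pass over the string after the prefix replace (objective: simpler).

-- ===== PORT A =====
-- `while p in s: s = s.replace(p, '')`; the fuel only makes the loop total
-- (here one replace always removes every occurrence, so the loop body runs at most once).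
def pyRemoveAll (p : String) (fuel : Nat) (s : String) : String :=
  match fuel with
  | 0 => s
  | Nat.succ f => if PySem.Str.isIn p s then pyRemoveAll p f (PySem.Str.replace s p "") else s

def to_name (string : String) : String :=
  let s1 := PySem.Str.replace string "npc_dota_hero_" ""
  let s2 := pyRemoveAll "\t" (s1.length + 1) s1
  let s3 := pyRemoveAll "\n" (s2.length + 1) s2
  let s4 := pyRemoveAll "\t1" (s3.length + 1) s3
  let s5 := pyRemoveAll " " (s4.length + 1) s4
  let s6 := pyRemoveAll "\"" (s5.length + 1) s5
  let s7 := PySem.Str.replace s6 "1" ""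
  PySem.Str.replace s7 "0" ""

-- ===== PORT B =====
-- `c not in DROP` on a single char = list membership in DROP's characters.
def to_name_alt (string : String) : String :=
  let s1 := PySem.Str.replace string "npc_dota_hero_" ""
  String.ofList (s1.toList.filter (fun c => !("\t\n \"10".toList.contains c)))

-- ===== PRECONDITION & SPEC =====
def Spec_to_name (string : String) (out : String) : Prop := out = to_name_alt string
instance (string : String) (out : String) : Decidable (Spec_to_name string out) := by unfold Spec_to_name; infer_instance

-- ===== CLAIM (what is proved, stated in full; the proofs are below) =====
def Claim_equal_to_name : Prop := ∀ (string : String), Dom_to_name string → Spec_to_name string (to_name string)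

-- ===== LEMMAS AND PROOFS =====

-- replace.go with a single-char pattern and empty replacement is List.filter
theorem go_single (c : Char) (l : List Char) : ∀ (fuel : Nat) (acc : List Char),
    l.length ≤ fuel →
    PySem.Chars.replace.go [c] [] fuel l acc = acc.reverse ++ l.filter (fun x => !(x == c)) := by
  induction l with
  | nil =>
    intro fuel acc _
    cases fuel <;> simp [PySem.Chars.replace.go]
  | cons d t ih =>
    intro fuel acc hle
    match fuel with
    | Nat.succ f =>
      rw [PySem.Chars.replace.go]
      by_cases h : d = c
      · subst h
        rw [if_pos (by simp [List.isPrefixOf])]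
        show PySem.Chars.replace.go [d] [] f t acc = _
        rw [ih f acc (by simpa using Nat.le_of_succ_le_succ hle)]
        simp
      · rw [if_neg (by simp [List.isPrefixOf]; exact fun hcd => h hcd.symm)]
        rw [ih f (d :: acc) (by simpa using Nat.le_of_succ_le_succ hle)]
        simp [h]

theorem replace_single (s : List Char) (c : Char) :
    PySem.Chars.replace s [c] [] = s.filter (fun x => !(x == c)) := by
  rw [PySem.Chars.replace]
  rw [if_neg (by simp)]
  simpa using go_single c s s.length [] le_rfl

theorem str_replace_single (s : String) (p : String) (c : Char) (hp : p.toList = [c]) :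
    PySem.Str.replace s p "" = String.ofList (s.toList.filter (fun x => !(x == c))) := by
  unfold PySem.Str.replace
  rw [hp]
  simp [replace_single]

theorem isIn_single (s : String) (p : String) (c : Char) (hp : p.toList = [c]) :
    PySem.Str.isIn p s = s.toList.contains c := by
  cases hh : PySem.Str.isIn p s
  · have h : ¬ p.toList <:+: s.toList := by
      rw [← PySem.Str.isIn_iff_infix, hh]; simp
    rw [hp, List.singleton_infix_iff] at h
    simp [List.contains_eq_mem, h]
  · have h : p.toList <:+: s.toList := (PySem.Str.isIn_iff_infix _ _).mp hh
    rw [hp, List.singleton_infix_iff] at h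
    simp [List.contains_eq_mem, h]

theorem removeAll_of_not_isIn (p : String) (fuel : Nat) (s : String)
    (h : PySem.Str.isIn p s = false) : pyRemoveAll p fuel s = s := by
  cases fuel with
  | zero => rfl
  | succ f => rw [pyRemoveAll, if_neg (by rw [h]; simp)]

-- the single-char while loop is one filter pass
theorem removeAll_single (p : String) (c : Char) (hp : p.toList = [c]) (fuel : Nat) (s : String)
    (hf : 1 ≤ fuel) :
    pyRemoveAll p fuel s = String.ofList (s.toList.filter (fun x => !(x == c))) := by
  match fuel with
  | Nat.succ f =>
    rw [pyRemoveAll]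
    cases hh : PySem.Str.isIn p s
    · rw [if_neg (by simp)]
      rw [isIn_single _ p c hp] at hh
      have hfix : s.toList.filter (fun x => !(x == c)) = s.toList := by
        apply List.filter_eq_self.mpr
        intro a ha
        simp only [Bool.not_eq_eq_eq_not, Bool.not_true, beq_eq_false_iff_ne]
        rintro rfl
        simp [List.contains_eq_mem, ha] at hh
      rw [hfix]
      simp
    · rw [if_pos rfl, str_replace_single s p c hp]
      apply removeAll_of_not_isIn
      rw [isIn_single _ p c hp]
      simp

theorem isIn_tab1_false (s : String) (h : s.toList.contains '\t' = false) :
    PySem.Str.isIn "\t1" s = false := by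
  cases hh : PySem.Str.isIn "\t1" s
  · rfl
  · exfalso
    have hinf := (PySem.Str.isIn_iff_infix _ _).mp hh
    have : '\t' ∈ s.toList := hinf.subset (by decide)
    simp [List.contains_eq_mem, this] at h

theorem drop_toList : "\t\n \"10".toList = ['\t', '\n', ' ', '"', '1', '0'] := by decide

theorem pred_eq (x : Char) :
    (!(x == '\t') && (!(x == '\n') && (!(x == ' ') && (!(x == '"') && (!(x == '1') && !(x == '0')))))) =
      !("\t\n \"10".toList.contains x) := by
  rw [drop_toList]
  simp only [List.contains_cons, List.contains_nil, Bool.or_false, Bool.not_or]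

theorem to_name_spec : Claim_equal_to_name := by
  intro s _
  simp only [Spec_to_name, to_name, to_name_alt]
  rw [removeAll_single "\t" '\t' (by decide) _ _ (by omega)]
  rw [removeAll_single "\n" '\n' (by decide) _ _ (by omega)]
  rw [removeAll_of_not_isIn "\t1" _ _ (by
    apply isIn_tab1_false
    simp [List.contains_eq_mem, List.mem_filter])]
  rw [removeAll_single " " ' ' (by decide) _ _ (by omega)]
  rw [removeAll_single "\"" '"' (by decide) _ _ (by omega)]
  rw [str_replace_single _ "1" '1' (by decide)]
  rw [str_replace_single _ "0" '0' (by decide)]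
  simp only [String.toList_ofList, List.filter_filter]
  congr 1
  apply List.filter_congr
  intro x _
  rw [← pred_eq x]
  ac_rfl
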